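-- pv_equiv track=rewrite | github.com/shannany0606/2024_LanQiao_Cup_Nation | h.py | check
-- ===== SOURCE A (Python) =====
-- def check(las,cnt,s,pre):
--     s-=las
--     tot=0
--     while cnt:
--         cnt-=1
--         tmp=las//2+(las&1)
--         tot+=tmp
--         las=tmp
--     return las<=pre*2 and tot<=s
-- ===== SOURCE B (Python) =====
-- def check(las, cnt, s, pre):
--     # Build the (short) chain of distinct ceil-halving values: cur stabilizes at
--     # 0 or 1 after ~log2(|las|) steps; the remaining iterations each add cur.
--     def half(x):
--         return -((-x) // 2)  # ceiling halving == x//2 + (x&1)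
--     chain = []
--     cur = las
--     while len(chain) < cnt and half(cur) != cur:
--         cur = half(cur)
--         chain.append(cur)
--     tot = sum(chain) + (cnt - len(chain)) * cur
--     return cur <= pre * 2 and tot <= s - las
-- ===== Notes on version B (the rewrite author's own statement) =====
-- stated objective: faster
-- what changed: B never loops cnt times: it materialises the short chain of distinct ceil-halving values (at most ~log2(las) of them, since the sequence stabilises at 0 or 1), sums that list, and adds the remaining (cnt - len(chain)) iterations' contribution in closed form.
import Mathlib
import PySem

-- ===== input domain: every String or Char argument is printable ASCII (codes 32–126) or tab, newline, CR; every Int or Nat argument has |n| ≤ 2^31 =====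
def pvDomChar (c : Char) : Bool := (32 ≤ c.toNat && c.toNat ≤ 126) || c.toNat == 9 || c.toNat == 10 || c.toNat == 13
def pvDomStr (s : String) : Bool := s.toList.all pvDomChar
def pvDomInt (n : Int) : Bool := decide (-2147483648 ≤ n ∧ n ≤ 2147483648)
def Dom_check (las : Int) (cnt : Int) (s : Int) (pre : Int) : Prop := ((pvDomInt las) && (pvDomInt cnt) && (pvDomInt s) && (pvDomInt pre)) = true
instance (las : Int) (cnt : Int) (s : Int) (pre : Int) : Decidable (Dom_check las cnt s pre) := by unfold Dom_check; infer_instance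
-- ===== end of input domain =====

-- B materialises the short chain of distinct ceil-halving values (the sequence stabilises
-- at 0 or 1), sums that list, and adds the remaining iterations' contribution in closed
-- form: O(log las) instead of A's O(cnt) loop.

-- ===== PORT A =====
-- A's while loop runs exactly cnt times (cnt ≥ 0 by Pre_); fuel = cnt.toNat.
-- Returns (las, tot) after the loop.
def checkLoopA : Nat → Int → Int → (Int × Int)
  | 0, las, tot => (las, tot)
  | n + 1, las, tot =>
    let tmp := PySem.Int.floordiv las 2 + PySem.Int.mod las 2
    checkLoopA n tmp (tot + tmp)

def check (las : Int) (cnt : Int) (s : Int) (pre : Int) : Bool :=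
  let s := s - las
  let r := checkLoopA cnt.toNat las 0
  decide (r.1 ≤ pre * 2) && decide (r.2 ≤ s)

-- ===== PORT B =====
-- B's ceiling halving half(x) = -((-x) // 2)
def halfB (x : Int) : Int := -(PySem.Int.floordiv (-x) 2)

-- B's while loop: append successive distinct halving values while the budget lasts;
-- returns (chain, cur). Budget `len(chain) < cnt` as fuel = cnt.toNat.
def chainB : Nat → Int → (List Int × Int)
  | 0, cur => ([], cur)
  | k + 1, cur =>
    if halfB cur ≠ cur then
      let r := chainB k (halfB cur)
      (halfB cur :: r.1, r.2)
    else ([], cur)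

def check_alt (las : Int) (cnt : Int) (s : Int) (pre : Int) : Bool :=
  let r := chainB cnt.toNat las
  let tot := r.1.sum + (cnt - (r.1.length : Int)) * r.2
  decide (r.2 ≤ pre * 2) && decide (tot ≤ s - las)

-- ===== PRECONDITION & SPEC =====
-- A's `while cnt:` decrements cnt and so never terminates when cnt < 0; Pre_ excludes
-- exactly those diverging inputs (on every input with cnt ≥ 0 A returns normally).
def Pre_check (las : Int) (cnt : Int) (s : Int) (pre : Int) : Prop := 0 ≤ cnt
instance (las : Int) (cnt : Int) (s : Int) (pre : Int) : Decidable (Pre_check las cnt s pre) := by unfold Pre_check; infer_instance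
def pvWitness_check : Int × Int × Int × Int := (13, 5, 40, 1)

def Spec_check (las : Int) (cnt : Int) (s : Int) (pre : Int) (out : Bool) : Prop := out = check_alt las cnt s pre
instance (las : Int) (cnt : Int) (s : Int) (pre : Int) (out : Bool) : Decidable (Spec_check las cnt s pre out) := by unfold Spec_check; infer_instance

-- ===== CLAIM (what is proved, stated in full; the proofs are below) =====
def Claim_equal_check : Prop := ∀ (las : Int) (cnt : Int) (s : Int) (pre : Int), Dom_check las cnt s pre → Pre_check las cnt s pre → Spec_check las cnt s pre (check las cnt s pre)

-- ===== LEMMAS AND PROOFS =====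

-- A's step and B's step are the same ceiling halving.
theorem halfB_eq (x : Int) : halfB x = PySem.Int.floordiv x 2 + PySem.Int.mod x 2 := by
  unfold halfB
  have h1 := PySem.Int.floordiv_mul_add_mod x 2
  have h2 := PySem.Int.floordiv_mul_add_mod (-x) 2
  have h3 : PySem.Int.mod x 2 = 0 ∨ PySem.Int.mod x 2 = 1 := by
    have := PySem.Int.mod_two_eq x; omega
  have h4 : PySem.Int.mod (-x) 2 = 0 ∨ PySem.Int.mod (-x) 2 = 1 := by
    have := PySem.Int.mod_two_eq (-x); omega
  omega

-- At a fixed point of the halving step, A's loop adds n copies of las.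
theorem checkLoopA_fixed (n : Nat) (las tot : Int)
    (h : PySem.Int.floordiv las 2 + PySem.Int.mod las 2 = las) :
    checkLoopA n las tot = (las, tot + (n : Int) * las) := by
  induction n generalizing tot with
  | zero => simp [checkLoopA]
  | succ n ih =>
    simp only [checkLoopA, h]
    rw [ih]
    push_cast
    ring_nf

-- A's loop result expressed through B's chain.
theorem checkLoopA_eq_chainB (n : Nat) (las tot : Int) :
    checkLoopA n las tot
      = ((chainB n las).2,
         tot + (chainB n las).1.sum + ((n : Int) - ((chainB n las).1.length : Int)) * (chainB n las).2) := by
  induction n generalizing las tot with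
  | zero => simp [checkLoopA, chainB]
  | succ n ih =>
    by_cases h : halfB las = las
    · have hfix : PySem.Int.floordiv las 2 + PySem.Int.mod las 2 = las := by
        rw [← halfB_eq]; exact h
      simp only [chainB, if_neg (not_not.mpr h)]
      simp only [checkLoopA, hfix]
      rw [checkLoopA_fixed n las (tot + las) hfix]
      simp
      ring_nf
    · simp only [chainB, if_pos h]
      simp only [checkLoopA, ← halfB_eq]
      rw [ih]
      simp
      ring_nf

-- ===== VERDICT (by name: the statement is the Claim_ definition above) =====
theorem check_spec : Claim_equal_check := by
  intro las cnt s pre _ hp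
  have hc : ((cnt.toNat : Int)) = cnt := Int.toNat_of_nonneg hp
  unfold Spec_check check check_alt
  rw [checkLoopA_eq_chainB, hc]
  ring_nf
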